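-- pv_equiv track=rewrite | github.com/Rohith-Sri-Sai/AI-Powered-Python-to-C-Transpiler | examples/bfs.py | heavy_bfs
-- ===== SOURCE A (Python) =====
-- def heavy_bfs(target_depth):
--     count = 0
--     # Run the BFS 2000 times to simulate a massive workload
--     for _ in range(2000):
--         queue = [0]
--         visited = [False] * target_depth
--
--         while len(queue) > 0:
--             node = queue.pop(0)
--             if not visited[node]:
--                 visited[node] = True
--                 count += 1
--                 # Add dummy children
--                 if node + 1 < target_depth:
--                     queue.append(node + 1)
--                 if node + 2 < target_depth:
--                     queue.append(node + 2)
--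
--     return count
-- ===== SOURCE B (Python) =====
-- def heavy_bfs(target_depth):
--     # The BFS explores the chain 0 -> 1 -> ... -> target_depth-1 and visits
--     # every node exactly once, so each of the 2000 rounds adds target_depth.
--     return 2000 * target_depth
-- ===== Notes on version B (the rewrite author's own statement) =====
-- stated objective: faster
-- what changed: Replaced A's 2000 simulated BFS runs (queue plus visited list, with a linear-time list.pop(0) on every step) by the closed form 2000*target_depth, since each BFS run over the successor chain visits every node exactly once.
import Mathlib
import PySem

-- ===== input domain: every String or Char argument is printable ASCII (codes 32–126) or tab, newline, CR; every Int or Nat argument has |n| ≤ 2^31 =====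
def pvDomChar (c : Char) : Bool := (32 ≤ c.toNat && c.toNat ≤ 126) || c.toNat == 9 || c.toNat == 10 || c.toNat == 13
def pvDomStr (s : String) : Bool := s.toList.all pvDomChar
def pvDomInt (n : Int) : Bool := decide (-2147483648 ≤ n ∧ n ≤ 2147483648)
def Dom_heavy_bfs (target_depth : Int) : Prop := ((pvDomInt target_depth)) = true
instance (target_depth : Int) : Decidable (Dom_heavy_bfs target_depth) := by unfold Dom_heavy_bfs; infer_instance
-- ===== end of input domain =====

-- B replaces A's 2000 simulated BFS runs over the 0→1→…→(d-1) chain with the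
-- closed form 2000*target_depth (objective: faster; each run visits every node once).


-- ===== PORT A =====
-- The inner `while queue:` loop; fuel only makes the recursion total (the proof
-- shows 3*d+1 steps always suffice inside Pre_); `none` = IndexError on visited[node].
def pvBfsLoop (d : Int) : Nat → List Int → List Bool → Int → Option Int
  | _, [], _, count => some count
  | 0, _ :: _, _, _ => none
  | fuel + 1, node :: rest, visited, count =>
    match PySem.List.pyGet? visited node with
    | none => none
    | some v =>
      if v then pvBfsLoop d fuel rest visited count
      else
        let visited' := PySem.List.pySetD visited node true
        let q1 := if node + 1 < d then rest ++ [node + 1] else rest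
        let q2 := if node + 2 < d then q1 ++ [node + 2] else q1
        pvBfsLoop d fuel q2 visited' (count + 1)

def heavy_bfs (target_depth : Int) : Int :=
  (((List.range 2000).foldl
      (fun acc _ => acc.bind fun count =>
        pvBfsLoop target_depth (3 * target_depth.toNat + 1) [0]
          (List.replicate target_depth.toNat false) count)
      (some 0))).getD 0

-- ===== PORT B =====
def heavy_bfs_alt (target_depth : Int) : Int := 2000 * target_depth

-- ===== PRECONDITION & SPEC =====
-- Pre_ excludes non-positive target_depth, where Python's A raises IndexError on its first access into the empty visited list.
def Pre_heavy_bfs (target_depth : Int) : Prop := 1 ≤ target_depth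
instance (target_depth : Int) : Decidable (Pre_heavy_bfs target_depth) := by unfold Pre_heavy_bfs; infer_instance
def pvWitness_heavy_bfs : Int := (3)

def Spec_heavy_bfs (target_depth : Int) (out : Int) : Prop := out = heavy_bfs_alt target_depth
instance (target_depth : Int) (out : Int) : Decidable (Spec_heavy_bfs target_depth out) := by unfold Spec_heavy_bfs; infer_instance

-- ===== CLAIM (what is proved, stated in full; the proofs are below) =====
def Claim_equal_heavy_bfs : Prop := ∀ (target_depth : Int), Dom_heavy_bfs target_depth → Pre_heavy_bfs target_depth → Spec_heavy_bfs target_depth (heavy_bfs target_depth)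

-- ===== LEMMAS AND PROOFS =====

-- visited = k trues then m falses: lookup below k is true
lemma pv_get_true (k m j : Nat) (hj : j < k) :
    PySem.List.pyGet? (List.replicate k true ++ List.replicate m false) ((j : Nat) : Int) = some true := by
  rw [PySem.List.pyGet?_natCast]
  rw [List.getElem?_append_left (by simpa using hj)]
  simp [hj]

-- lookup exactly at k (with at least one false) is false
lemma pv_get_false (k m : Nat) (hm : 1 ≤ m) :
    PySem.List.pyGet? (List.replicate k true ++ List.replicate m false) ((k : Nat) : Int) = some false := by
  rw [PySem.List.pyGet?_natCast]
  rw [List.getElem?_append_right (by simp)]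
  simp [List.getElem?_replicate]
  omega

-- marking node k turns the prefix of trues one longer
lemma pv_set_mark (k m : Nat) :
    PySem.List.pySetD (List.replicate k true ++ (false :: List.replicate m false)) ((k : Nat) : Int) true
      = List.replicate (k + 1) true ++ List.replicate m false := by
  rw [PySem.List.pySetD_natCast]
  rw [List.set_append_right _ _ (by simp)]
  simp [List.replicate_succ' (n := k)]

-- the BFS invariant: from a state with k nodes visited, a stale prefix L of
-- already-visited nodes, a copies of node k and b copies of node k+1 queued,
-- the loop returns count + (D - k)
lemma pv_bfs_inv (D : Nat) : ∀ (n : Nat) (k a b : Nat) (L : List Int) (count : Int),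
    3 * (D - k) + (L.length + a + b) ≤ n →
    k ≤ D →
    (∀ x ∈ L, ∃ j : Nat, x = (j : Int) ∧ j < k) →
    (k < D ↔ 1 ≤ a) →
    (1 ≤ b → k + 1 < D) →
    pvBfsLoop (D : Int) n (L ++ List.replicate a ((k : Nat) : Int) ++ List.replicate b (((k : Nat) : Int) + 1))
        (List.replicate k true ++ List.replicate (D - k) false) count
      = some (count + ((D : Int) - (k : Int))) := by
  intro n
  induction n with
  | zero =>
    intro k a b L count hmeas hk hL ha hb
    have hL0 : L = [] := List.eq_nil_of_length_eq_zero (by omega)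
    have ha0 : a = 0 := by omega
    have hb0 : b = 0 := by omega
    have hkD : k = D := by
      by_contra h
      have := ha.mp (by omega)
      omega
    subst hL0 ha0 hb0 hkD
    simp [pvBfsLoop]
  | succ n ih =>
    intro k a b L count hmeas hk hL ha hb
    match hLc : L with
    | x :: L' =>
      obtain ⟨j, rfl, hj⟩ := hL x (by simp)
      have hv : PySem.List.pyGet? (List.replicate k true ++ List.replicate (D - k) false) ((j : Nat) : Int) = some true :=
        pv_get_true k (D - k) j hj
      simp only [List.cons_append, pvBfsLoop, hv, if_pos]
      exact ih k a b L' count (by simp only [List.length_cons] at hmeas; omega) hk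
        (fun x hx => hL x (by simp [hx])) ha hb
    | [] =>
      match hac : a with
      | 0 =>
        have hkD : k = D := by
          by_contra h
          have := ha.mp (by omega)
          omega
        have hb0 : b = 0 := by
          by_contra h
          have := hb (by omega)
          omega
        subst hkD hb0
        simp [pvBfsLoop]
      | a' + 1 =>
        have hkD : k < D := ha.mpr (by omega)
        have hvis : List.replicate (D - k) false = false :: List.replicate (D - k - 1) false := by
          rw [← List.replicate_succ]
          congr 1
          omega
        have hv : PySem.List.pyGet? (List.replicate k true ++ List.replicate (D - k) false) ((k : Nat) : Int) = some false :=
          pv_get_false k (D - k) (by omega)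
        have hmark : PySem.List.pySetD (List.replicate k true ++ List.replicate (D - k) false) ((k : Nat) : Int) true
            = List.replicate (k + 1) true ++ List.replicate (D - (k + 1)) false := by
          rw [hvis, pv_set_mark k (D - k - 1), show D - k - 1 = D - (k + 1) from by omega]
        have hcast : (((k + 1 : Nat)) : Int) = ((k : Nat) : Int) + 1 := by push_cast; ring
        have e2 : (((k : Nat) : Int) + 1) + 1 = ((k : Nat) : Int) + 2 := by ring
        simp only [List.nil_append, List.replicate_succ, List.cons_append, pvBfsLoop, hv, hmark,
          Bool.false_eq_true, if_false]
        by_cases hk1 : k + 1 < D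
        · have hc1 : ((k : Nat) : Int) + 1 < (D : Int) := by omega
          by_cases hk2 : k + 2 < D
          · have hc2 : ((k : Nat) : Int) + 2 < (D : Int) := by omega
            rw [if_pos hc1, if_pos hc2]
            have hq : ((List.replicate a' ((k : Nat) : Int) ++ List.replicate b (((k : Nat) : Int) + 1)) ++ [((k : Nat) : Int) + 1]) ++ [((k : Nat) : Int) + 2]
                = List.replicate a' ((k : Nat) : Int) ++ List.replicate (b + 1) (((k + 1 : Nat) : Int)) ++ List.replicate 1 (((k + 1 : Nat) : Int) + 1) := by
              rw [List.replicate_succ' (n := b), hcast, e2]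
              simp [List.append_assoc]
            rw [hq]
            have hrec := ih (k + 1) (b + 1) 1 (List.replicate a' ((k : Nat) : Int)) (count + 1)
              (by simp only [List.length_nil, List.length_replicate] at hmeas ⊢; omega) (by omega)
              (by intro x hx
                  rw [List.mem_replicate] at hx
                  exact ⟨k, hx.2, by omega⟩)
              (by omega) (by omega)
            rw [show (true :: (List.replicate k true ++ List.replicate (D - (k + 1)) false))
                = List.replicate (k + 1) true ++ List.replicate (D - (k + 1)) false from by
                  simp [List.replicate_succ]]
            rw [hrec]
            congr 1
            push_cast
            ring
          · have hc2 : ¬ (((k : Nat) : Int) + 2 < (D : Int)) := by omega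
            rw [if_pos hc1, if_neg hc2]
            have hq : (List.replicate a' ((k : Nat) : Int) ++ List.replicate b (((k : Nat) : Int) + 1)) ++ [((k : Nat) : Int) + 1]
                = List.replicate a' ((k : Nat) : Int) ++ List.replicate (b + 1) (((k + 1 : Nat) : Int)) ++ List.replicate 0 (((k + 1 : Nat) : Int) + 1) := by
              rw [List.replicate_succ' (n := b), hcast]
              simp [List.append_assoc]
            rw [hq]
            have hrec := ih (k + 1) (b + 1) 0 (List.replicate a' ((k : Nat) : Int)) (count + 1)
              (by simp only [List.length_nil, List.length_replicate] at hmeas ⊢; omega) (by omega)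
              (by intro x hx
                  rw [List.mem_replicate] at hx
                  exact ⟨k, hx.2, by omega⟩)
              (by omega) (by omega)
            rw [show (true :: (List.replicate k true ++ List.replicate (D - (k + 1)) false))
                = List.replicate (k + 1) true ++ List.replicate (D - (k + 1)) false from by
                  simp [List.replicate_succ]]
            rw [hrec]
            congr 1
            push_cast
            ring
        · -- k+1 = D: nothing is enqueued, the queue drains
          have hb0 : b = 0 := by
            by_contra h
            have := hb (by omega)
            omega
          subst hb0
          have hc1 : ¬ (((k : Nat) : Int) + 1 < (D : Int)) := by omega
          have hc2 : ¬ (((k : Nat) : Int) + 2 < (D : Int)) := by omega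
          rw [if_neg hc1, if_neg hc2]
          have hq : List.replicate a' ((k : Nat) : Int) ++ List.replicate 0 (((k : Nat) : Int) + 1)
              = List.replicate a' ((k : Nat) : Int) ++ List.replicate 0 (((k + 1 : Nat) : Int)) ++ List.replicate 0 (((k + 1 : Nat) : Int) + 1) := by
            simp
          rw [hq]
          have hrec := ih (k + 1) 0 0 (List.replicate a' ((k : Nat) : Int)) (count + 1)
            (by simp only [List.length_nil, List.length_replicate] at hmeas ⊢; omega) (by omega)
            (by intro x hx
                rw [List.mem_replicate] at hx
                exact ⟨k, hx.2, by omega⟩)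
            (by omega) (by omega)
          rw [show (true :: (List.replicate k true ++ List.replicate (D - (k + 1)) false))
              = List.replicate (k + 1) true ++ List.replicate (D - (k + 1)) false from by
                simp [List.replicate_succ]]
          rw [hrec]
          have hD1 : D = k + 1 := by omega
          subst hD1
          congr 1
          push_cast
          ring

lemma pv_one_run (D : Nat) (hD : 1 ≤ D) (count : Int) :
    pvBfsLoop (D : Int) (3 * D + 1) [0] (List.replicate D false) count
      = some (count + (D : Int)) := by
  have h := pv_bfs_inv D (3 * D + 1) 0 1 0 [] count (by simp only [List.length_nil]; omega) (by omega)
    (by intro x hx; simp at hx) (by omega) (by omega)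
  simpa using h

lemma pv_fold_runs (D : Nat) (hD : 1 ≤ D) :
    ∀ (l : List Nat) (count : Int),
      l.foldl (fun acc _ => acc.bind fun c =>
          pvBfsLoop (D : Int) (3 * D + 1) [0] (List.replicate D false) c) (some count)
        = some (count + l.length * (D : Int)) := by
  intro l
  induction l with
  | nil => intro count; simp
  | cons x xs ih =>
    intro count
    simp only [List.foldl_cons, Option.bind_some, pv_one_run D hD count, ih]
    congr 1
    push_cast [List.length_cons]
    ring

-- ===== VERDICT (by name: the statement is the Claim_ definition above) =====
theorem heavy_bfs_spec : Claim_equal_heavy_bfs := by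
  intro d _ hpre
  have h1 : 1 ≤ d := hpre
  unfold Spec_heavy_bfs heavy_bfs heavy_bfs_alt
  obtain ⟨D, hD1, rfl⟩ : ∃ D : Nat, 1 ≤ D ∧ d = (D : Int) :=
    ⟨d.toNat, by omega, (Int.toNat_of_nonneg (by omega)).symm⟩
  rw [show ((D : Int)).toNat = D from Int.toNat_natCast D]
  rw [pv_fold_runs D hD1 (List.range 2000) 0]
  simp
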